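-- pv_equiv track=rewrite | github.com/wangela/coding-fun | adventofcode/day06.py | reallocate
-- ===== SOURCE A (Python) =====
-- def reallocate(A):
--     # Parameters: A is an array with 16 integers
--     # Perform: Take the index with the max value and redistribute one per following index until reaching zero
--     # Output: Integer count of how many redistributions will happen until a configuration has been seen before
--     # Example:
--     #     With 4 memory banks [0, 2, 7, 0] -> [2,4,1,2] -> [3,1,2,3] -> [0,2,3,4] -> [1,3,4,1]-> [2,4,1,2] -> 5
--     configurations = set()
--     count = 0
--     repeated = False
--
--     while repeated == False:
--         t = tuple(A)
--         if t in configurations: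
--             repeated = True
--             break
--         else:
--             configurations.add(t)
--             count += 1
--             max_value = max(A)
--             max_index = A.index(max_value)
--             A[max_index] = 0
--             A = redistribute(A, max_index + 1, max_value)
--
--     return count
--
-- def redistribute(A, start_index, blocks):
--     for i in range(blocks):
--         new_index = (start_index + i) % len(A)
--         A[new_index] += 1
--     return A
-- ===== SOURCE B (Python) =====
-- def reallocate(A):
--     # B: same cycle-hunt, but a redistribution of m blocks is done with one
--     # divmod: quotient q to every bank (only when q > 0), then one extra block
--     # to the r banks after the emptied one -- instead of A's loop handing out
--     # the m blocks one at a time. Works on a copy (A mutates its argument in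
--     # place; the equivalence is about the return value).
--     banks = list(A)
--     seen = set()
--     steps = 0
--     while tuple(banks) not in seen:
--         seen.add(tuple(banks))
--         steps += 1
--         n = len(banks)
--         m = max(banks)
--         i = banks.index(m)
--         banks[i] = 0
--         if m > 0:
--             q, r = divmod(m, n)
--             if q:
--                 for j in range(n):
--                     banks[j] += q
--             for j in range(r):
--                 banks[(i + 1 + j) % n] += 1
--     return steps
-- ===== Notes on version B (the rewrite author's own statement) =====
-- stated objective: alternative
-- what changed: A redistribution of m blocks is done with one divmod -- the quotient q added to every bank in a single pass (only when q > 0), then one extra block to the r banks following the emptied one -- instead of A's loop handing out the m blocks one at a time; B also works on a copy instead of mutating the argument.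
import Mathlib
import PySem

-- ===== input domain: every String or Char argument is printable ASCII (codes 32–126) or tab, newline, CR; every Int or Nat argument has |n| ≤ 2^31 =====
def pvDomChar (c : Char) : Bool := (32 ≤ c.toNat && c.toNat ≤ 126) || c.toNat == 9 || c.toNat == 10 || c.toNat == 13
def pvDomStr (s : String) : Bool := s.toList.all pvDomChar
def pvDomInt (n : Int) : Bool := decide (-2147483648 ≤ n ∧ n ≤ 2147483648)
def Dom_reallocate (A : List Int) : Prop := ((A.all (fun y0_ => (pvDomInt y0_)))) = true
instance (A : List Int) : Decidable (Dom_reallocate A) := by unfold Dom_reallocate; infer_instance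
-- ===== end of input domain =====

-- B replaces A's one-block-at-a-time redistribution loop by a divmod distribution
-- (quotient to every bank when nonzero, one extra block to the r banks after the emptied one).
-- Python A mutates its argument in place; B works on a copy — the equivalence is about the return value.


-- ===== PORT A =====
-- def redistribute(A, start_index, blocks): for i in range(blocks): A[(start_index+i) % len(A)] += 1
-- the computed index is (start+i) % len(A) ∈ [0, len A), so the in-place '+= 1' is exactly List.modify there
def redistribute (A : List Int) (start_index : Int) (blocks : Int) : List Int :=
  (PySem.List.pyRange 0 blocks 1).foldl
    (fun xs i => xs.modify (PySem.Int.mod (start_index + i) ((xs.length : Int))).toNat (· + 1)) A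

-- fuel guard totalising Python's 'while' (a repeat always occurs; the 0-fuel branch is never reached)
def pvFuel : Nat := 2 ^ 64

def reallocateLoop (fuel : Nat) (A : List Int) (configurations : PySem.Set (List Int)) (count : Int) : Int :=
  match fuel with
  | 0 => count
  | fuel + 1 =>
    if PySem.Set.contains configurations A then count    -- 'if t in configurations: break'
    else
      let configurations := PySem.Set.add configurations A
      let count := count + 1
      match PySem.List.max? A (fun x => x) with
      | none => count                                    -- unreachable: Python max([]) raises, Pre_ excludes []
      | some max_value =>
        match PySem.List.index? A max_value with
        | none => count                                  -- unreachable: max_value ∈ A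
        | some max_index =>
          let A := A.set max_index 0
          reallocateLoop fuel (redistribute A ((max_index : Int) + 1) max_value) configurations count

def reallocate (A : List Int) : Int := reallocateLoop pvFuel A PySem.Set.empty 0

-- ===== PORT B =====
def reallocate_altLoop (fuel : Nat) (banks : List Int) (seen : PySem.Set (List Int)) (steps : Int) : Int :=
  match fuel with
  | 0 => steps
  | fuel + 1 =>
    if PySem.Set.contains seen banks then steps          -- 'while tuple(banks) not in seen'
    else
      let seen := PySem.Set.add seen banks
      let steps := steps + 1
      let n : Int := (banks.length : Int)
      match PySem.List.max? banks (fun x => x) with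
      | none => steps                                    -- unreachable: Python max([]) raises, Pre_ excludes []
      | some m =>
        match PySem.List.index? banks m with
        | none => steps                                  -- unreachable: m ∈ banks
        | some i =>
          let banks := banks.set i 0
          let banks :=
            if m > 0 then
              let q := PySem.Int.floordiv m n
              let r := PySem.Int.mod m n
              let banks :=
                if q ≠ 0 then
                  (PySem.List.pyRange 0 n 1).foldl
                    (fun zs j => zs.modify j.toNat (· + q)) banks
                else banks
              (PySem.List.pyRange 0 r 1).foldl
                (fun zs j => zs.modify (PySem.Int.mod ((i : Int) + 1 + j) n).toNat (· + 1)) banks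
            else banks
          reallocate_altLoop fuel banks seen steps

def reallocate_alt (A : List Int) : Int := reallocate_altLoop pvFuel A PySem.Set.empty 0

-- ===== PRECONDITION & SPEC =====
-- Pre_ excludes only the empty list, on which Python A raises ValueError (max of an empty sequence).
def Pre_reallocate (A : List Int) : Prop := A ≠ []
instance (A : List Int) : Decidable (Pre_reallocate A) := by unfold Pre_reallocate; infer_instance
def pvWitness_reallocate : List Int := ([0, 2, 7, 0])

def Spec_reallocate (A : List Int) (out : Int) : Prop := out = reallocate_alt A
instance (A : List Int) (out : Int) : Decidable (Spec_reallocate A out) := by unfold Spec_reallocate; infer_instance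

-- ===== CLAIM (what is proved, stated in full; the proofs are below) =====
def Claim_equal_reallocate : Prop := ∀ (A : List Int), Dom_reallocate A → Pre_reallocate A → Spec_reallocate A (reallocate A)

-- ===== LEMMAS AND PROOFS =====

-- fold that adds amounts at (Nat) positions; both redistribution folds reduce to it
def addAll (ps : List (Nat × Int)) (xs : List Int) : List Int :=
  ps.foldl (fun ys p => ys.modify p.1 (· + p.2)) xs

lemma addAll_cons (p : Nat × Int) (ps : List (Nat × Int)) (xs : List Int) :
    addAll (p :: ps) xs = addAll ps (xs.modify p.1 (· + p.2)) := rfl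

lemma length_addAll (ps : List (Nat × Int)) (xs : List Int) :
    (addAll ps xs).length = xs.length := by
  induction ps generalizing xs with
  | nil => rfl
  | cons p ps ih => rw [addAll_cons, ih, List.length_modify]

lemma getElem_addAll (ps : List (Nat × Int)) (xs : List Int) (k : Nat) (hk : k < xs.length)
    (hk' : k < (addAll ps xs).length) :
    (addAll ps xs)[k] = xs[k] + (((ps.filter (fun p => p.1 == k)).map (·.2)).sum) := by
  induction ps generalizing xs with
  | nil => simp [addAll]
  | cons p ps ih =>
    have hk2 : k < (xs.modify p.1 (· + p.2)).length := by rw [List.length_modify]; exact hk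
    simp only [addAll_cons]
    rw [ih _ hk2 (by rw [length_addAll]; exact hk2), List.getElem_modify]
    by_cases h : p.1 = k
    · simp [h, add_assoc]
    · simp [h]

-- the unique offset j ∈ [0,n) with (s+j) % n = k is (n + k - s % n) % n
lemma key_mod_self (n s k : Nat) (hn : 0 < n) (hk : k < n) :
    (s + (n + k - s % n) % n) % n = k := by
  have hs1 : s % n < n := Nat.mod_lt _ hn
  have hs2 : s % n ≤ s := Nat.mod_le _ _
  have hdm := Nat.div_add_mod s n
  have e1 : (s + (n + k - s % n) % n) % n = (s + (n + k - s % n)) % n :=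
    Nat.ModEq.add_left s (Nat.mod_modEq _ n)
  have e2 : s + (n + k - s % n) = n * (s / n) + n + k := by omega
  rw [e1, e2, show n * (s / n) + n + k = n * (s / n + 1) + k by ring,
      Nat.mul_add_mod]
  exact Nat.mod_eq_of_lt hk

lemma key_mod_iff (n s k j : Nat) (hn : 0 < n) (hk : k < n) (hj : j < n) :
    ((s + j) % n = k) ↔ j = (n + k - s % n) % n := by
  constructor
  · intro h
    have h2 := key_mod_self n s k hn hk
    have hj0 : (n + k - s % n) % n < n := Nat.mod_lt _ hn
    have hme : j ≡ (n + k - s % n) % n [MOD n] :=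
      Nat.ModEq.add_left_cancel' s
        (show (s + j) % n = (s + (n + k - s % n) % n) % n by rw [h, h2])
    have hme' := hme
    unfold Nat.ModEq at hme'
    rw [Nat.mod_eq_of_lt hj, Nat.mod_eq_of_lt hj0] at hme'
    exact hme'
  · intro h; subst h; exact key_mod_self n s k hn hk

-- one-at-a-time distribution hits residue k exactly  m/n + (1 if the unique offset < m%n)  times
lemma countP_key (n s k : Nat) (hn : 0 < n) (hk : k < n) (m : Nat) :
    (List.range m).countP (fun i => (s + i) % n == k)
      = m / n + (if (n + k - s % n) % n < m % n then 1 else 0) := by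
  induction m with
  | zero => simp [Nat.zero_div]
  | succ m ih =>
    rw [List.range_succ, List.countP_append, ih]
    have hbm : m % n < n := Nat.mod_lt _ hn
    have hiff : ((s + m) % n = k) ↔ m % n = (n + k - s % n) % n := by
      have he : (s + m) % n = (s + m % n) % n :=
        (Nat.ModEq.add_left s (Nat.mod_modEq m n)).symm
      rw [he]
      exact key_mod_iff n s k (m % n) hn hk hbm
    have hdm := Nat.div_add_mod m n
    have hcnt : (List.countP (fun i => (s + i) % n == k) [m])
        = if m % n = (n + k - s % n) % n then 1 else 0 := by
      simp only [List.countP_cons, List.countP_nil, beq_iff_eq]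
      simp [hiff]
    rw [hcnt]
    by_cases hb : m % n + 1 < n
    · have h1 : (m + 1) % n = m % n + 1 := by
        conv_lhs => rw [show m + 1 = n * (m / n) + (m % n + 1) by omega]
        rw [Nat.mul_add_mod]
        exact Nat.mod_eq_of_lt hb
      have h2 : (m + 1) / n = m / n := by
        conv_lhs => rw [show m + 1 = n * (m / n) + (m % n + 1) by omega]
        rw [Nat.mul_add_div hn, Nat.div_eq_of_lt hb]
        omega
      rw [h1, h2]
      split_ifs <;> omega
    · have hsplit : m + 1 = n * (m / n + 1) := by
        have : n * (m / n + 1) = n * (m / n) + n := by ring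
        omega
      have h1 : (m + 1) % n = 0 := by rw [hsplit]; exact Nat.mul_mod_right n _
      have h2 : (m + 1) / n = m / n + 1 := by rw [hsplit]; exact Nat.mul_div_cancel_left _ hn
      have hj0 : (n + k - s % n) % n < n := Nat.mod_lt _ hn
      rw [h1, h2]
      split_ifs <;> omega

-- value added at position k by the one-at-a-time scheme
lemma sumA_eq (n s m k : Nat) (hn : 0 < n) (hk : k < n) :
    ((((List.range m).map (fun i => ((s + i) % n, (1 : Int)))).filter (fun p => p.1 == k)).map (·.2)).sum
      = ((m / n : Nat) : Int) + if (n + k - s % n) % n < m % n then 1 else 0 := by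
  rw [List.filter_map, List.map_map]
  rw [show (((fun (p : Nat × Int) => p.1 == k)) ∘ fun (j : Nat) => ((s + j) % n, (1 : Int)))
        = fun j => (s + j) % n == k from rfl]
  rw [show ((fun (x : Nat × Int) => x.2) ∘ fun (i : Nat) => ((s + i) % n, (1 : Int)))
        = fun _ => (1 : Int) from rfl]
  rw [PySem.List.sum_map_const_int, ← List.countP_eq_length_filter, countP_key n s k hn hk m]
  push_cast
  split_ifs <;> ring

-- value added at position k by B's full q-pass
lemma sumQ_eq (n k : Nat) (q : Int) (hk : k < n) :
    ((((List.range n).map (fun j => (j, q))).filter (fun p => p.1 == k)).map (·.2)).sum = q := by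
  rw [List.filter_map, List.map_map]
  rw [show (((fun (p : Nat × Int) => p.1 == k)) ∘ fun (j : Nat) => (j, q)) = fun j => j == k from rfl]
  rw [List.filter_beq, List.count_range, if_pos hk]
  simp

-- A's redistribution fold, with the (invariant) length frozen
lemma foldA_fix (L : List Nat) (s : Nat) : ∀ xs : List Int,
    L.foldl (fun ys i => ys.modify (PySem.Int.mod ((s : Int) + (i : Int)) ((ys.length : Int))).toNat (· + 1)) xs
      = L.foldl (fun ys i => ys.modify ((s + i) % xs.length) (· + (1 : Int))) xs := by
  induction L with
  | nil => intro xs; rfl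
  | cons a L ih =>
    intro xs
    simp only [List.foldl_cons]
    have hidx : (PySem.Int.mod ((s : Int) + (a : Int)) ((xs.length : Int))).toNat
        = (s + a) % xs.length := by
      rw [show ((s : Int) + (a : Int)) = (((s + a : Nat)) : Int) by push_cast; ring,
          PySem.Int.mod_natCast, Int.toNat_natCast]
    rw [hidx, ih, List.length_modify]

lemma redistribute_eq_addAll (xs : List Int) (s : Nat) (m : Int) :
    redistribute xs ((s : Nat) : Int) m
      = addAll ((List.range m.toNat).map (fun i => ((s + i) % xs.length, (1 : Int)))) xs := by
  unfold redistribute addAll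
  rw [PySem.List.pyRange_one]
  simp only [Int.sub_zero, zero_add, List.foldl_map]
  exact foldA_fix (List.range m.toNat) s xs

-- B's q-pass as an addAll
lemma qfold_eq_addAll (xs : List Int) (n : Nat) (q : Int) :
    (PySem.List.pyRange 0 ((n : Nat) : Int) 1).foldl
      (fun zs j => zs.modify j.toNat (· + q)) xs
      = addAll ((List.range n).map (fun j => (j, q))) xs := by
  unfold addAll
  rw [PySem.List.pyRange_one]
  simp only [Int.sub_zero, Int.toNat_natCast, zero_add, List.foldl_map]

-- B's remainder pass as an addAll
lemma rfold_eq_addAll (xs : List Int) (s : Nat) (n r : Nat) :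
    (PySem.List.pyRange 0 ((r : Nat) : Int) 1).foldl
      (fun zs j => zs.modify (PySem.Int.mod (((s : Nat) : Int) + j) ((n : Nat) : Int)).toNat (· + 1)) xs
      = addAll ((List.range r).map (fun j => ((s + j) % n, (1 : Int)))) xs := by
  unfold addAll
  rw [PySem.List.pyRange_one]
  simp only [Int.sub_zero, Int.toNat_natCast, zero_add, List.foldl_map]
  apply PySem.List.foldl_congr_mem
  intro ys j hj
  rw [show ((s : Int) + (j : Int)) = (((s + j : Nat)) : Int) by push_cast; ring,
      PySem.Int.mod_natCast, Int.toNat_natCast]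

lemma addAll_append (ps qs : List (Nat × Int)) (xs : List Int) :
    addAll (ps ++ qs) xs = addAll qs (addAll ps xs) := by
  unfold addAll
  rw [List.foldl_append]

-- the redistribution step of A equals the divmod step of B
lemma step_eq (xs : List Int) (hx : 0 < xs.length) (s : Nat) (m : Int) (n : Nat) (hn : n = xs.length) :
    redistribute xs ((s : Nat) : Int) m
      = (if m > 0 then
          (PySem.List.pyRange 0 (PySem.Int.mod m ((n : Nat) : Int)) 1).foldl
            (fun zs j => zs.modify (PySem.Int.mod (((s : Nat) : Int) + j) ((n : Nat) : Int)).toNat (· + 1))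
            (if PySem.Int.floordiv m ((n : Nat) : Int) ≠ 0 then
              (PySem.List.pyRange 0 ((n : Nat) : Int) 1).foldl
                (fun zs j => zs.modify j.toNat (· + PySem.Int.floordiv m ((n : Nat) : Int))) xs
             else xs)
        else xs) := by
  subst hn
  by_cases hm : m > 0
  · rw [if_pos hm]
    have hmn : m = ((m.toNat : Nat) : Int) := (Int.toNat_of_nonneg hm.le).symm
    have hfd : PySem.Int.floordiv m ((xs.length : Nat) : Int) = ((m.toNat / xs.length : Nat) : Int) := by
      conv_lhs => rw [hmn]
      rw [PySem.Int.floordiv_natCast]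
    have hmd : PySem.Int.mod m ((xs.length : Nat) : Int) = ((m.toNat % xs.length : Nat) : Int) := by
      conv_lhs => rw [hmn]
      rw [PySem.Int.mod_natCast]
    rw [hfd, hmd, rfold_eq_addAll, redistribute_eq_addAll]
    have hr : m.toNat % xs.length < xs.length := Nat.mod_lt _ hx
    by_cases hq : m.toNat / xs.length = 0
    · rw [if_neg (show ¬((m.toNat / xs.length : Nat) : Int) ≠ 0 by simp [hq])]
      have : m.toNat % xs.length = m.toNat := Nat.mod_eq_of_lt (Nat.lt_of_div_eq_zero hx hq)
      rw [this]
    · rw [if_pos (show ((m.toNat / xs.length : Nat) : Int) ≠ 0 by exact_mod_cast hq),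
          qfold_eq_addAll, ← addAll_append]
      apply List.ext_getElem ((length_addAll _ _).trans (length_addAll _ _).symm)
      intro k h1 h2
      have hkx : k < xs.length := by rwa [length_addAll] at h1
      rw [getElem_addAll _ _ _ hkx h1, getElem_addAll _ _ _ hkx h2]
      congr 1
      rw [List.filter_append, List.map_append, List.sum_append,
          sumA_eq xs.length s m.toNat k hx hkx, sumQ_eq xs.length k _ hkx,
          sumA_eq xs.length s (m.toNat % xs.length) k hx hkx,
          Nat.div_eq_of_lt hr, Nat.mod_eq_of_lt hr]
      push_cast
      split_ifs <;> ring
  · rw [if_neg hm]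
    unfold redistribute
    rw [PySem.List.pyRange_one_eq_nil (by omega)]
    rfl

lemma loop_eq (fuel : Nat) : ∀ (xs : List Int) (cfg : PySem.Set (List Int)) (cnt : Int),
    reallocateLoop fuel xs cfg cnt = reallocate_altLoop fuel xs cfg cnt := by
  induction fuel with
  | zero => intro xs cfg cnt; rfl
  | succ f ih =>
    intro xs cfg cnt
    rw [reallocateLoop, reallocate_altLoop]
    cases hc : PySem.Set.contains cfg xs with
    | true => rfl
    | false =>
      simp only [Bool.false_eq_true, if_false]
      cases hmax : PySem.List.max? xs (fun x => x) with
      | none => simp only []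
      | some m =>
        simp only []
        cases hidx : PySem.List.index? xs m with
        | none => simp only []
        | some mi =>
          simp only []
          have hx : xs ≠ [] := by
            intro h
            rw [h, (PySem.List.max?_eq_none_iff ([] : List Int) (fun x => x)).mpr rfl] at hmax
            cases hmax
          have hxl : 0 < xs.length := List.length_pos_iff.mpr hx
          have hset : (xs.set mi 0).length = xs.length := List.length_set
          have hcast : ((mi : Int) + 1) = (((mi + 1 : Nat)) : Int) := by push_cast; ring
          simp only [hcast]
          rw [step_eq (xs.set mi 0) (by rw [hset]; exact hxl) (mi + 1) m xs.length hset.symm]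
          exact ih _ _ _

-- ===== VERDICT (by name: the statement is the Claim_ definition above) =====
theorem reallocate_spec : Claim_equal_reallocate := by
  intro A _hdom _hpre
  unfold Spec_reallocate reallocate reallocate_alt
  exact loop_eq pvFuel A PySem.Set.empty 0
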